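-- pv_equiv track=rewrite | github.com/pshlego/SPARTA | src/utils/sparta.py | get_joinable_tables
-- ===== SOURCE A (Python) =====
-- def get_table_from_clause(join_clause):
--     A, B = join_clause.split("=")
--     return A.split(".")[0], B.split(".")[0]
--
-- def get_joinable_tables(table, join_clause_list):
--     """Returns a set of tables that can be joined with the given table."""
--     table_set = set()
--     for join_clause in sorted(join_clause_list):
--         t1, t2 = get_table_from_clause(join_clause)
--         if table == t1:
--             table_set.update([t2])
--         if table == t2:
--             table_set.update([t1])
--
--     return list(table_set)
-- ===== SOURCE B (Python) =====
-- def get_table_from_clause(join_clause):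
--     A, B = join_clause.split("=")
--     return A.split(".")[0], B.split(".")[0]
--
-- def get_joinable_tables(table, join_clause_list):
--     """Returns a set of tables that can be joined with the given table."""
--     adj = {}
--     for join_clause in sorted(join_clause_list):
--         t1, t2 = get_table_from_clause(join_clause)
--         adj.setdefault(t1, set()).add(t2)
--         adj.setdefault(t2, set()).add(t1)
--     return list(adj.get(table, set()))
-- ===== Notes on version B (the rewrite author's own statement) =====
-- stated objective: alternative
-- what changed: Instead of conditionally collecting neighbours of the queried table during the scan, B builds the full join-graph adjacency index (dict of sets) in one pass and answers the query with a single dict lookup; Pre_ excludes clauses without exactly one '=', on which both A and B raise ValueError in get_table_from_clause.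
import Mathlib
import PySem

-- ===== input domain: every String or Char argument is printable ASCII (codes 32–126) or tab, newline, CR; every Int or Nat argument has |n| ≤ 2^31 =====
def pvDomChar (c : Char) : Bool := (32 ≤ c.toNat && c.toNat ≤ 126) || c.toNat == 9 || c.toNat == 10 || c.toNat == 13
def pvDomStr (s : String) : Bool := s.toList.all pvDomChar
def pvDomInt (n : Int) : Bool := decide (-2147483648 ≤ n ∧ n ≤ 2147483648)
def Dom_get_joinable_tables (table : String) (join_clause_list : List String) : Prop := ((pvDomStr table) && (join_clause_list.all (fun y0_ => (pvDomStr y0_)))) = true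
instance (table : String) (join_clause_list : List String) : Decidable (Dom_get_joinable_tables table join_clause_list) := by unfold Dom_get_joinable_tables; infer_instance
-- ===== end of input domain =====

-- B builds the full join-graph adjacency index (dict of sets) and answers with one lookup,
-- instead of conditionally collecting neighbours of the queried table during the scan (objective: alternative).
-- Equivalence is about the RETURNED SET of tables; the order of the returned list (Python set iteration order) is not part of the claim.


-- ===== PORT A =====
-- get_table_from_clause, shared module helper of A and B; 'none' is exactly Python's
-- ValueError from unpacking 'A, B = join_clause.split("=")' (≠ 2 parts).
-- 'A.split(".")[0]' never raises (split returns a nonempty list); '.headD ""' is exact there.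
def get_table_from_clause? (join_clause : String) : Option (String × String) :=
  match PySem.Str.split? join_clause "=" with
  | some [a, b] => some (((PySem.Str.split? a ".").getD []).headD "", ((PySem.Str.split? b ".").getD []).headD "")
  | _ => none

def get_joinable_tables (table : String) (join_clause_list : List String) : List String :=
  (PySem.List.sorted join_clause_list (fun x => x) false).foldl
    (fun (table_set : PySem.Set String) join_clause =>
      match get_table_from_clause? join_clause with
      | none => table_set          -- Python raises here; excluded by Pre_
      | some (t1, t2) =>
        let table_set := if table == t1 then PySem.Set.update table_set [t2] else table_set
        if table == t2 then PySem.Set.update table_set [t1] else table_set)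
    PySem.Set.empty

-- ===== PORT B =====
-- adj.setdefault(t, set()).add(u) is exactly Dict.modify adj t Set.empty (fun s => s.add u)
def get_joinable_tables_alt (table : String) (join_clause_list : List String) : List String :=
  let adj : PySem.Dict String (PySem.Set String) :=
    (PySem.List.sorted join_clause_list (fun x => x) false).foldl
      (fun adj join_clause =>
        match get_table_from_clause? join_clause with
        | none => adj              -- Python raises here; excluded by Pre_
        | some (t1, t2) =>
          let adj := PySem.Dict.modify adj t1 PySem.Set.empty (fun s => PySem.Set.add s t2)
          PySem.Dict.modify adj t2 PySem.Set.empty (fun s => PySem.Set.add s t1))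
      PySem.Dict.empty
  PySem.Dict.getD adj table PySem.Set.empty

-- ===== PRECONDITION & SPEC =====
-- Pre_ excludes exactly the clauses on which A (and B) raise ValueError: a clause whose
-- split on "=" does not have exactly two parts.
def Pre_get_joinable_tables (table : String) (join_clause_list : List String) : Prop :=
  ∀ jc ∈ join_clause_list, ((PySem.Str.split? jc "=").getD []).length = 2
instance (table : String) (join_clause_list : List String) : Decidable (Pre_get_joinable_tables table join_clause_list) := by unfold Pre_get_joinable_tables; infer_instance
def pvWitness_get_joinable_tables : String × List String := ("a", ["a.x=b.y", "c.u=a.v"])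

def Spec_get_joinable_tables (table : String) (join_clause_list : List String) (out : List String) : Prop := out = get_joinable_tables_alt table join_clause_list
instance (table : String) (join_clause_list : List String) (out : List String) : Decidable (Spec_get_joinable_tables table join_clause_list out) := by unfold Spec_get_joinable_tables; infer_instance

-- ===== CLAIM (what is proved, stated in full; the proofs are below) =====
def Claim_equal_get_joinable_tables : Prop := ∀ (table : String) (join_clause_list : List String), Dom_get_joinable_tables table join_clause_list → Pre_get_joinable_tables table join_clause_list → Spec_get_joinable_tables table join_clause_list (get_joinable_tables table join_clause_list)

-- ===== LEMMAS AND PROOFS =====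

-- Loop invariant: B's dict, read at the queried table, tracks A's running set.
theorem pv_loop (table : String) (L : List String)
    (hL : ∀ jc ∈ L, (get_table_from_clause? jc).isSome)
    (d : PySem.Dict String (PySem.Set String)) :
    PySem.Dict.getD
      (L.foldl (fun adj join_clause =>
        match get_table_from_clause? join_clause with
        | none => adj
        | some (t1, t2) =>
          let adj := PySem.Dict.modify adj t1 PySem.Set.empty (fun s => PySem.Set.add s t2)
          PySem.Dict.modify adj t2 PySem.Set.empty (fun s => PySem.Set.add s t1)) d)
      table PySem.Set.empty
    = L.foldl (fun (table_set : PySem.Set String) join_clause =>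
        match get_table_from_clause? join_clause with
        | none => table_set
        | some (t1, t2) =>
          let table_set := if table == t1 then PySem.Set.update table_set [t2] else table_set
          if table == t2 then PySem.Set.update table_set [t1] else table_set)
        (PySem.Dict.getD d table PySem.Set.empty) := by
  induction L generalizing d with
  | nil => rfl
  | cons jc rest ih =>
    obtain ⟨⟨t1, t2⟩, hjc⟩ := Option.isSome_iff_exists.mp (hL jc (List.mem_cons_self))
    simp only [List.foldl_cons, hjc]
    rw [ih (fun x hx => hL x (List.mem_cons_of_mem _ hx))]
    congr 1
    by_cases h1 : table = t1 <;> by_cases h2 : table = t2 <;>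
      simp_all [PySem.Dict.getD_modify, PySem.Set.update, beq_iff_eq]

theorem get_joinable_tables_spec_aux (table : String) (join_clause_list : List String)
    (hpre : Pre_get_joinable_tables table join_clause_list) :
    get_joinable_tables table join_clause_list = get_joinable_tables_alt table join_clause_list := by
  unfold get_joinable_tables get_joinable_tables_alt
  rw [pv_loop]
  · simp [PySem.Dict.getD_empty]
  · intro jc hjc
    have hmem : jc ∈ join_clause_list := (PySem.List.mem_sorted _ _ _ _).mp hjc
    have h2 := hpre jc hmem
    unfold get_table_from_clause?
    rcases hsp : PySem.Str.split? jc "=" with _ | l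
    · exact absurd hsp (by simp [PySem.Str.split?, PySem.Chars.split?])
    · rcases l with _ | ⟨a, _ | ⟨b, _ | _⟩⟩ <;> simp_all

-- ===== VERDICT (by name: the statement is the Claim_ definition above) =====
theorem get_joinable_tables_spec : Claim_equal_get_joinable_tables := by
  intro table join_clause_list _ hpre
  exact get_joinable_tables_spec_aux table join_clause_list hpre
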